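-- pv_equiv track=rewrite | github.com/SarelSchlesinger/Codility-Solutions | Challenges/YearOfTheRabbit.py | solution
-- ===== SOURCE A (Python) =====
-- def solution(A, B):
--     def solution1(A, B, numOfRotates = 0):
--         if numOfRotates == len(A):
--             return  - (1 + numOfRotates)
--         for i in range(len(A)):
--             if A[i] == B[i]:
--                 return 1 + solution1(A, [B[-1]] + B[:-1], numOfRotates + 1)
--         return 0
--     return solution1(A, B)
-- ===== SOURCE B (Python) =====
-- def solution(A, B):
--     n, m = len(A), len(B)
--     if n == 0:
--         return -1
--     shifts = {(i - j) % m for i in range(n) for j in range(m) if A[i] == B[j]}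
--     return next((k for k in range(n) if k not in shifts), -1)
-- ===== Notes on version B (the rewrite author's own statement) =====
-- stated objective: alternative
-- what changed: Replaces the recursion that physically rebuilds a rotated copy of B at every level with one pass that collects the set of shifts (i-j) mod m having a position match, then scans for the first shift without one; no list is ever rotated or copied.
-- outside the precondition, e.g. on solution([1, 2], [1]): A returns -1, B returns 1; on solution([1, 2], [2]): A raises IndexError, B returns 1
import Mathlib
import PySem

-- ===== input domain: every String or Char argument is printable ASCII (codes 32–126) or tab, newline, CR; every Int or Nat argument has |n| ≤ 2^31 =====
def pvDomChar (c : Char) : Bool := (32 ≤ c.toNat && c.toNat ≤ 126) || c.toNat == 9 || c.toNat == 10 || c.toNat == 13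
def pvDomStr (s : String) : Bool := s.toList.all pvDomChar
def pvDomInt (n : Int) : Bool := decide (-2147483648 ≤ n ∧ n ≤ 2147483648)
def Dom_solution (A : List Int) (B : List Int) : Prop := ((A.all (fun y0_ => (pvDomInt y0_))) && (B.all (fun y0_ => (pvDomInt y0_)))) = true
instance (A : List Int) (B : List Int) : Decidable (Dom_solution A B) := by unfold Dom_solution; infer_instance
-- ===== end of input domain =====

-- B replaces A's recursion (which rebuilds a rotated copy of B at every level) by one pass collecting
-- the set of shifts with a position match, then a scan for the first missing shift (objective: alternative).

-- ===== PORT A =====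
-- [B[-1]] + B[:-1]  (Python raises on empty B; such inputs are outside Pre_solution)
def pvRot (B : List Int) : List Int := B.getD (B.length - 1) 0 :: B.dropLast

-- solution1: recursion on numOfRotates; fuel = len(A) - numOfRotates only makes termination structural,
-- it is never exhausted on inputs satisfying Pre_solution.
def solutionRec (A : List Int) (B : List Int) (numOfRotates : Nat) (fuel : Nat) : Int :=
  if numOfRotates = A.length then -(1 + (numOfRotates : Int))
  else
    match fuel with
    | 0 => 0
    | fuel + 1 =>
      -- 'for i in range(len(A)): if A[i] == B[i]: return 1 + solution1(...)' — the loop returns at the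
      -- first matching i, so it returns 1 + recursion iff some i < len(A) matches (A[i]/B[i] as getD;
      -- exact under Pre_solution, where all indices are in range)
      if (List.range A.length).any (fun i => decide (A.getD i 0 = B.getD i 0)) then
        1 + solutionRec A (pvRot B) (numOfRotates + 1) fuel
      else 0

def solution (A : List Int) (B : List Int) : Int := solutionRec A B 0 A.length

-- ===== PORT B =====
def solution_alt (A : List Int) (B : List Int) : Int :=
  let n := A.length
  let m := B.length
  if n = 0 then -1
  else
    let shifts : PySem.Set Int :=
      (List.range n).foldl (fun s i =>
        (List.range m).foldl (fun s j =>
          if A.getD i 0 = B.getD j 0 then PySem.Set.add s (PySem.Int.mod ((i : Int) - (j : Int)) (m : Int)) else s) s)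
        PySem.Set.empty
    match (List.range n).find? (fun (k : Nat) => !(PySem.Set.contains shifts (k : Int))) with
    | some k => (k : Int)
    | none => -1

-- ===== PRECONDITION & SPEC =====
-- Pre_ excludes inputs with len(A) > len(B): there A usually raises IndexError (B[i] or B[-1] out of
-- range), and in the rare cases where it still returns, its value comes from rotating the shorter B
-- against a longer A — an accident no caller of this Codility task (equal lengths) can rely on.
def Pre_solution (A : List Int) (B : List Int) : Prop := A.length ≤ B.length
instance (A : List Int) (B : List Int) : Decidable (Pre_solution A B) := by unfold Pre_solution; infer_instance
def pvWitness_solution : List Int × List Int := ([1, 2], [2, 1])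
def Spec_solution (A : List Int) (B : List Int) (out : Int) : Prop := out = solution_alt A B
instance (A : List Int) (B : List Int) (out : Int) : Decidable (Spec_solution A B out) := by unfold Spec_solution; infer_instance

-- ===== CLAIM (what is proved, stated in full; the proofs are below) =====
def Claim_equal_solution : Prop := ∀ (A : List Int) (B : List Int), Dom_solution A B → Pre_solution A B → Spec_solution A B (solution A B)

-- ===== LEMMAS AND PROOFS =====

-- whether rotation level k has a position match, phrased over the ORIGINAL B:
-- level-k rotated B has B[(i - k) mod m] at position i, i.e. B[(i + k*(m-1)) % m] in Nat arithmetic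
def hasMatch (A : List Int) (B : List Int) (k : Nat) : Bool :=
  (List.range A.length).any (fun i => decide (A.getD i 0 = B.getD ((i + k * (B.length - 1)) % B.length) 0))

-- reference form of A's recursion
def auxSpec (A : List Int) (B : List Int) : Nat → Nat → Int
  | 0, k => -(1 + (k : Int))
  | c + 1, k => if hasMatch A B k then 1 + auxSpec A B c (k + 1) else 0

theorem pvRot_length (B : List Int) (h : 0 < B.length) : (pvRot B).length = B.length := by
  simp [pvRot]; omega

theorem pvRot_getD (B : List Int) (i : Nat) (hm : 0 < B.length) (hi : i < B.length) :
    (pvRot B).getD i 0 = B.getD ((i + B.length - 1) % B.length) 0 := by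
  match i with
  | 0 =>
    have h0 : 0 + B.length - 1 < B.length := by omega
    rw [Nat.mod_eq_of_lt h0]
    simp [pvRot]
  | i + 1 =>
    have h1 : (i + 1 + B.length - 1) % B.length = i := by
      have h2 : i + 1 + B.length - 1 = i + B.length := by omega
      rw [h2, Nat.add_mod_right, Nat.mod_eq_of_lt (by omega : i < B.length)]
    simp only [pvRot, List.getD_cons_succ, h1]
    have hd : i < B.length - 1 := by omega
    simp [List.getD, hd, List.getElem?_eq_getElem (by omega : i < B.length)]

theorem recEq (A B : List Int) (c k : Nat) (Bk : List Int)
    (hck : k + c = A.length) (hlen : Bk.length = B.length) (hm : 0 < B.length)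
    (hnm : A.length ≤ B.length)
    (hinv : ∀ i, i < B.length → Bk.getD i 0 = B.getD ((i + k * (B.length - 1)) % B.length) 0) :
    solutionRec A Bk k c = auxSpec A B c k := by
  induction c generalizing k Bk with
  | zero => simp [solutionRec, auxSpec, hck.symm]
  | succ c ih =>
    have hk : k ≠ A.length := by omega
    have hany : ((List.range A.length).any (fun i => decide (A.getD i 0 = Bk.getD i 0))) = hasMatch A B k := by
      unfold hasMatch
      refine PySem.List.any_congr_mem ?_
      intro i hi
      rw [List.mem_range] at hi
      rw [hinv i (by omega)]
    rw [solutionRec, if_neg hk, hany]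
    unfold auxSpec
    by_cases h : hasMatch A B k = true
    · rw [if_pos h, if_pos h]
      congr 1
      refine ih (k + 1) (pvRot Bk) (by omega) (by rw [pvRot_length Bk (by omega), hlen]) ?_
      intro i hi
      rw [pvRot_getD Bk i (by omega) (by omega), hlen]
      rw [hinv ((i + B.length - 1) % B.length) (Nat.mod_lt _ hm)]
      have key : ((i + B.length - 1) % B.length + k * (B.length - 1)) % B.length
          = (i + (k + 1) * (B.length - 1)) % B.length := by
        rw [Nat.mod_add_mod]
        have hmul : (k + 1) * (B.length - 1) = k * (B.length - 1) + (B.length - 1) := by ring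
        rw [hmul]
        congr 1
        omega
      rw [key]
    · rw [if_neg h, if_neg h]

-- A's recursion = "first missing shift, else -1", as a find? over range' k c
theorem auxSpec_find (A B : List Int) (c k : Nat) :
    auxSpec A B c k =
      match (List.range' k c).find? (fun t => !hasMatch A B t) with
      | some t => (t : Int) - (k : Int)
      | none => -(1 + (k : Int)) := by
  induction c generalizing k with
  | zero => simp [auxSpec]
  | succ c ih =>
    rw [List.range'_succ, List.find?_cons]
    unfold auxSpec
    by_cases h : hasMatch A B k = true
    · rw [if_pos h, h, ih (k + 1)]
      simp only [Bool.not_true]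
      cases (List.range' (k + 1) c).find? (fun t => !hasMatch A B t) with
      | some t => push_cast; ring
      | none => push_cast; ring
    · rw [if_neg h]
      have : (!hasMatch A B k) = true := by simp [h]
      rw [this]
      simp

-- membership in the inner foldl of the shift set
theorem mem_inner_foldl (A B : List Int) (i : Nat) (l : List Nat) (s : PySem.Set Int) (x : Int) :
    (x ∈ l.foldl (fun s j =>
        if A.getD i 0 = B.getD j 0 then PySem.Set.add s (PySem.Int.mod ((i : Int) - (j : Int)) (B.length : Int)) else s) s)
    ↔ x ∈ s ∨ ∃ j ∈ l, A.getD i 0 = B.getD j 0 ∧ PySem.Int.mod ((i : Int) - (j : Int)) (B.length : Int) = x := by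
  induction l generalizing s with
  | nil => simp
  | cons j l ih =>
    simp only [List.foldl_cons, ih, List.mem_cons]
    by_cases h : A.getD i 0 = B.getD j 0
    · rw [if_pos h]
      rw [PySem.Set.mem_add]
      constructor
      · rintro (⟨hs | he⟩ | ⟨j', hj', hm', hx⟩)
        · exact Or.inl hs
        · exact Or.inr ⟨j, Or.inl rfl, h, he.symm⟩
        · exact Or.inr ⟨j', Or.inr hj', hm', hx⟩
      · rintro (hs | ⟨j', (rfl | hj'), hm', hx⟩)
        · exact Or.inl (Or.inl hs)
        · exact Or.inl (Or.inr hx.symm)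
        · exact Or.inr ⟨j', hj', hm', hx⟩
    · rw [if_neg h]
      constructor
      · rintro (hs | ⟨j', hj', hm', hx⟩)
        · exact Or.inl hs
        · exact Or.inr ⟨j', Or.inr hj', hm', hx⟩
      · rintro (hs | ⟨j', (rfl | hj'), hm', hx⟩)
        · exact Or.inl hs
        · exact absurd hm' h
        · exact Or.inr ⟨j', hj', hm', hx⟩

-- membership in the whole shift set
theorem mem_shifts (A B : List Int) (l : List Nat) (s : PySem.Set Int) (x : Int) :
    (x ∈ l.foldl (fun s i => (List.range B.length).foldl (fun s j =>
        if A.getD i 0 = B.getD j 0 then PySem.Set.add s (PySem.Int.mod ((i : Int) - (j : Int)) (B.length : Int)) else s) s) s)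
    ↔ x ∈ s ∨ ∃ i ∈ l, ∃ j < B.length, A.getD i 0 = B.getD j 0 ∧ PySem.Int.mod ((i : Int) - (j : Int)) (B.length : Int) = x := by
  induction l generalizing s with
  | nil => simp
  | cons i l ih =>
    simp only [List.foldl_cons, ih, mem_inner_foldl, List.mem_cons, List.mem_range]
    constructor
    · rintro (⟨hs | ⟨j, hj, hm', hx⟩⟩ | ⟨i', hi', rest⟩)
      · exact Or.inl hs
      · exact Or.inr ⟨i, Or.inl rfl, j, hj, hm', hx⟩
      · exact Or.inr ⟨i', Or.inr hi', rest⟩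
    · rintro (hs | ⟨i', (rfl | hi'), j, hj, hm', hx⟩)
      · exact Or.inl (Or.inl hs)
      · exact Or.inl (Or.inr ⟨j, hj, hm', hx⟩)
      · exact Or.inr ⟨i', hi', j, hj, hm', hx⟩

-- Nat index (i + k*(m-1)) % m is the Int value (i - k) mod m
theorem idxCast (i k m : Nat) (hm : 1 ≤ m) :
    (((i + k * (m - 1)) % m : Nat) : Int) = ((i : Int) - (k : Int)) % (m : Int) := by
  push_cast [Nat.cast_sub hm]
  have h : (i : Int) + (k : Int) * ((m : Int) - 1) = ((i : Int) - (k : Int)) + (k : Int) * (m : Int) := by ring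
  rw [h, Int.add_mul_emod_self_right]

theorem emod_sub_eq_iff (i j k m : Int) (_hm : 0 < m) (hj : 0 ≤ j) (hj' : j < m)
    (hk : 0 ≤ k) (hk' : k < m) : (i - j) % m = k ↔ j = (i - k) % m := by
  constructor
  · intro h
    rw [← h, Int.sub_emod i ((i - j) % m), Int.emod_emod_of_dvd _ dvd_rfl, ← Int.sub_emod]
    have h2 : i - (i - j) = j := by ring
    rw [h2, Int.emod_eq_of_lt hj hj']
  · intro h
    rw [h, Int.sub_emod i ((i - k) % m), Int.emod_emod_of_dvd _ dvd_rfl, ← Int.sub_emod]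
    have h2 : i - (i - k) = k := by ring
    rw [h2, Int.emod_eq_of_lt hk hk']

-- for k < m, shift-set membership at k is exactly "level k has a match"
theorem find?_congr_mem {α : Type} (l : List α) (p q : α → Bool) (h : ∀ x ∈ l, p x = q x) :
    l.find? p = l.find? q := by
  induction l with
  | nil => rfl
  | cons a l ih =>
    rw [List.find?_cons, List.find?_cons, h a (List.mem_cons_self)]
    cases q a with
    | true => rfl
    | false => exact ih (fun x hx => h x (List.mem_cons_of_mem a hx))

theorem contains_eq_hasMatch (A B : List Int) (k : Nat) (hk : k < B.length) (_hnm : A.length ≤ B.length) :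
    PySem.Set.contains
      ((List.range A.length).foldl (fun s i => (List.range B.length).foldl (fun s j =>
        if A.getD i 0 = B.getD j 0 then PySem.Set.add s (PySem.Int.mod ((i : Int) - (j : Int)) (B.length : Int)) else s) s)
        PySem.Set.empty) (k : Int)
    = hasMatch A B k := by
  have hm : 0 < B.length := by omega
  have hmod : ∀ x : Int, PySem.Int.mod x (B.length : Int) = x % (B.length : Int) := fun x =>
    PySem.Int.mod_eq_emod_of_pos (by exact_mod_cast hm)
  rw [Bool.eq_iff_iff, PySem.Set.contains_iff, mem_shifts]
  unfold hasMatch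
  rw [List.any_eq_true]
  simp only [PySem.Set.empty, List.not_mem_nil, false_or, List.mem_range, decide_eq_true_eq, hmod]
  constructor
  · rintro ⟨i, hi, j, hj, hij, hx⟩
    refine ⟨i, hi, ?_⟩
    have hjj : (j : Int) = ((i : Int) - (k : Int)) % (B.length : Int) := by
      rw [← emod_sub_eq_iff (i : Int) (j : Int) (k : Int) (B.length : Int)
        (by exact_mod_cast hm) (Int.natCast_nonneg j) (by exact_mod_cast hj) (Int.natCast_nonneg k) (by exact_mod_cast hk)]
      exact hx
    have : j = (i + k * (B.length - 1)) % B.length := by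
      have := idxCast i k B.length hm
      omega
    rw [← this]
    exact hij
  · rintro ⟨i, hi, hij⟩
    refine ⟨i, hi, (i + k * (B.length - 1)) % B.length, Nat.mod_lt _ hm, hij, ?_⟩
    rw [emod_sub_eq_iff (i : Int) _ (k : Int) (B.length : Int)
      (by exact_mod_cast hm) (Int.natCast_nonneg _) ?_ (Int.natCast_nonneg k) (by exact_mod_cast hk)]
    · exact idxCast i k B.length hm
    · have := Nat.mod_lt (i + k * (B.length - 1)) hm
      exact_mod_cast this

-- ===== VERDICT (by name: the statement is the Claim_ definition above) =====
theorem solution_spec : Claim_equal_solution := by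
  intro A B _ hpre
  unfold Spec_solution Pre_solution at *
  by_cases hn : A.length = 0
  · unfold solution solutionRec solution_alt
    simp [hn]
  · have hm : 0 < B.length := by omega
    have h1 : solution A B = auxSpec A B A.length 0 := by
      unfold solution
      refine recEq A B A.length 0 B (by omega) rfl hm hpre ?_
      intro i hi
      rw [Nat.zero_mul, Nat.add_zero, Nat.mod_eq_of_lt hi]
    have hcongr : (List.range A.length).find? (fun t => !hasMatch A B t)
        = (List.range A.length).find? (fun (k : Nat) =>
            !(PySem.Set.contains
              ((List.range A.length).foldl (fun s i => (List.range B.length).foldl (fun s j =>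
                if A.getD i 0 = B.getD j 0 then PySem.Set.add s (PySem.Int.mod ((i : Int) - (j : Int)) (B.length : Int)) else s) s)
                PySem.Set.empty) (k : Int))) := by
      refine find?_congr_mem _ _ _ ?_
      intro t ht
      rw [List.mem_range] at ht
      rw [contains_eq_hasMatch A B t (by omega) hpre]
    rw [h1, auxSpec_find, ← List.range_eq_range']
    unfold solution_alt
    rw [if_neg hn]
    show (match (List.range A.length).find? (fun t => !hasMatch A B t) with
          | some t => (t : Int) - ((0 : Nat) : Int)
          | none => -(1 + ((0 : Nat) : Int)))
        = (match (List.range A.length).find? (fun (k : Nat) =>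
            !(PySem.Set.contains
              ((List.range A.length).foldl (fun s i => (List.range B.length).foldl (fun s j =>
                if A.getD i 0 = B.getD j 0 then PySem.Set.add s (PySem.Int.mod ((i : Int) - (j : Int)) (B.length : Int)) else s) s)
                PySem.Set.empty) (k : Int))) with
          | some k => (k : Int)
          | none => -1)
    rw [← hcongr]
    cases hF : (List.range A.length).find? (fun t => !hasMatch A B t) with
    | some t => simp
    | none => simp
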